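-- pv_equiv track=rewrite | github.com/xiplus-mediawiki-programs/Wikimedia-RecentChange-Monitor | action/message_function.py | protect_description
-- ===== SOURCE A (Python) =====
-- def protect_description(description):
--     r = {
--         '[edit=': '[編輯=',
--         '[move=': '[移動=',
--         '[create=': '[建立=',
--         '=autoconfirmed]': '=僅允許已自動確認的使用者]',
--         '=sysop]': '=僅限管理員]',
--         '=templateeditor]': '=僅允許模板編輯員和管理員]',
--     }
--     for key in r:
--         description = description.replace(key, r[key])
--     return description
-- ===== SOURCE B (Python) =====
-- def protect_description(description):
--     # single left-to-right scan; prefix rules keep their '=' so a suffix rule can still match it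
--     prefixes = {
--         '[edit=': '[\u7de8\u8f2f',
--         '[move=': '[\u79fb\u52d5',
--         '[create=': '[\u5efa\u7acb',
--     }
--     suffixes = {
--         '=autoconfirmed]': '=\u50c5\u5141\u8a31\u5df2\u81ea\u52d5\u78ba\u8a8d\u7684\u4f7f\u7528\u8005]',
--         '=sysop]': '=\u50c5\u9650\u7ba1\u7406\u54e1]',
--         '=templateeditor]': '=\u50c5\u5141\u8a31\u6a21\u677f\u7de8\u8f2f\u54e1\u548c\u7ba1\u7406\u54e1]',
--     }
--     out = []
--     i = 0
--     n = len(description)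
--     while i < n:
--         for k, v in prefixes.items():
--             if description.startswith(k, i):
--                 out.append(v)
--                 i += len(k) - 1  # leave the '=' in place
--                 break
--         else:
--             for k, v in suffixes.items():
--                 if description.startswith(k, i):
--                     out.append(v)
--                     i += len(k)
--                     break
--             else:
--                 out.append(description[i])
--                 i += 1
--     return ''.join(out)
-- ===== Notes on version B (the rewrite author's own statement) =====
-- stated objective: alternative
-- what changed: A makes six successive full-string replace passes (each rescanning the whole intermediate string); B makes one left-to-right scan that matches the six rules positionally and emits the translation directly, with prefix rules leaving their '=' in place so a suffix rule can still consume it.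
import Mathlib
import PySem

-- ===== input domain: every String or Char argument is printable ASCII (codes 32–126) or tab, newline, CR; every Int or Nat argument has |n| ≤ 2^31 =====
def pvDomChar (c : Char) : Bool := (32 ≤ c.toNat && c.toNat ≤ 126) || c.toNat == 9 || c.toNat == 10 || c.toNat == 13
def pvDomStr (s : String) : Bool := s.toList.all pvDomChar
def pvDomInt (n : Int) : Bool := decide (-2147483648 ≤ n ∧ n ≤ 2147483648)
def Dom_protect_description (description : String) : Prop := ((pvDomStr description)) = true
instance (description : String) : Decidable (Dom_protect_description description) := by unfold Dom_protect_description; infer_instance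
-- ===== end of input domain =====

-- B replaces A's six sequential replace passes by one left-to-right scan (alternative decomposition, same result).

-- ===== PORT A =====
def pvTrans : PySem.Dict String String := PySem.Dict.ofList
  [("[edit=", "[編輯="), ("[move=", "[移動="), ("[create=", "[建立="),
   ("=autoconfirmed]", "=僅允許已自動確認的使用者]"),
   ("=sysop]", "=僅限管理員]"),
   ("=templateeditor]", "=僅允許模板編輯員和管理員]")]

def protect_description (description : String) : String :=
  (PySem.Dict.keys pvTrans).foldl
    (fun s key => PySem.Str.replace s key (PySem.Dict.getD pvTrans key "")) description

-- ===== PORT B =====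
def pvK1 : List Char := ['[', 'e', 'd', 'i', 't', '=']
def pvK2 : List Char := ['[', 'm', 'o', 'v', 'e', '=']
def pvK3 : List Char := ['[', 'c', 'r', 'e', 'a', 't', 'e', '=']
def pvK4 : List Char := ['=', 'a', 'u', 't', 'o', 'c', 'o', 'n', 'f', 'i', 'r', 'm', 'e', 'd', ']']
def pvK5 : List Char := ['=', 's', 'y', 's', 'o', 'p', ']']
def pvK6 : List Char := ['=', 't', 'e', 'm', 'p', 'l', 'a', 't', 'e', 'e', 'd', 'i', 't', 'o', 'r', ']']
def pvB1 : List Char := ['[', '編', '輯']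
def pvB2 : List Char := ['[', '移', '動']
def pvB3 : List Char := ['[', '建', '立']
def pvV4 : List Char := ['=', '僅', '允', '許', '已', '自', '動', '確', '認', '的', '使', '用', '者', ']']
def pvV5 : List Char := ['=', '僅', '限', '管', '理', '員', ']']
def pvV6 : List Char := ['=', '僅', '允', '許', '模', '板', '編', '輯', '員', '和', '管', '理', '員', ']']

-- the while-loop of Source B as structural recursion on the unscanned rest of the string
def pvScan : List Char → List Char
  | [] => []
  | c :: t =>
    if pvK1.isPrefixOf (c :: t) then pvB1 ++ pvScan ((c :: t).drop 5)
    else if pvK2.isPrefixOf (c :: t) then pvB2 ++ pvScan ((c :: t).drop 5)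
    else if pvK3.isPrefixOf (c :: t) then pvB3 ++ pvScan ((c :: t).drop 7)
    else if pvK4.isPrefixOf (c :: t) then pvV4 ++ pvScan ((c :: t).drop 15)
    else if pvK5.isPrefixOf (c :: t) then pvV5 ++ pvScan ((c :: t).drop 7)
    else if pvK6.isPrefixOf (c :: t) then pvV6 ++ pvScan ((c :: t).drop 16)
    else c :: pvScan t
  termination_by l => l.length
  decreasing_by all_goals (simp only [List.length_drop, List.length_cons]; omega)

def protect_description_alt (description : String) : String :=
  String.ofList (pvScan description.toList)

-- ===== PRECONDITION & SPEC =====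
def Spec_protect_description (description : String) (out : String) : Prop := out = protect_description_alt description
instance (description : String) (out : String) : Decidable (Spec_protect_description description out) := by unfold Spec_protect_description; infer_instance

-- ===== CLAIM (what is proved, stated in full; the proofs are below) =====
def Claim_equal_protect_description : Prop := ∀ (description : String), Dom_protect_description description → Spec_protect_description description (protect_description description)

-- ===== LEMMAS AND PROOFS =====

def pvV1' : List Char := ['[', '編', '輯', '=']
def pvV2' : List Char := ['[', '移', '動', '=']
def pvV3' : List Char := ['[', '建', '立', '=']

-- Python str.replace (nonempty needle) as plain structural recursion
def pvRep (old new : List Char) : List Char → List Char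
  | [] => []
  | c :: t => if old.isPrefixOf (c :: t) then new ++ pvRep old new (t.drop (old.length - 1))
              else c :: pvRep old new t
  termination_by l => l.length
  decreasing_by all_goals (simp only [List.length_drop, List.length_cons]; omega)

lemma pvGoSpec (old new : List Char) (hold : old ≠ []) :
    ∀ (fuel : Nat) (l acc : List Char), l.length ≤ fuel →
      PySem.Chars.replace.go old new fuel l acc = acc.reverse ++ pvRep old new l := by
  intro fuel
  induction fuel with
  | zero =>
    intro l acc h
    have hl : l = [] := by cases l with
      | nil => rfl
      | cons a b => simp at h
    subst hl
    simp [PySem.Chars.replace.go, pvRep]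
  | succ n ih =>
    intro l acc h
    cases l with
    | nil => simp [PySem.Chars.replace.go, pvRep]
    | cons c t =>
      obtain ⟨o, os, rfl⟩ : ∃ o os, old = o :: os := by
        cases old with
        | nil => exact absurd rfl hold
        | cons o os => exact ⟨o, os, rfl⟩
      simp only [PySem.Chars.replace.go]
      by_cases hp : (o :: os).isPrefixOf (c :: t) = true
      · rw [if_pos hp, pvRep.eq_2, if_pos hp]
        rw [ih]
        · simp [List.length_cons, List.drop_succ_cons]
        · simp only [List.length_drop, List.length_cons] at h ⊢
          omega
      · rw [if_neg hp, pvRep.eq_2, if_neg hp]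
        rw [ih]
        · simp
        · simp only [List.length_cons] at h
          omega

lemma pvReplace_eq (old new : List Char) (h : old ≠ []) (l : List Char) :
    PySem.Chars.replace l old new = pvRep old new l := by
  unfold PySem.Chars.replace
  rw [if_neg (by simp [h])]
  rw [pvGoSpec old new h l.length l [] le_rfl]
  simp

-- if a prefix of a replace-output avoids the replacement's first character, it was a prefix of the input
lemma pvRep_pull (old new : List Char) (m : Char) (hm : new.head? = some m) :
    ∀ (l w : List Char), w <+: pvRep old new l → m ∉ w → w <+: l := by
  intro l
  induction l with
  | nil =>
    intro w hw _
    rw [pvRep.eq_1] at hw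
    rw [List.prefix_nil.mp hw]
  | cons c t ih =>
    intro w hw hmw
    by_cases hp : old.isPrefixOf (c :: t) = true
    · rw [pvRep.eq_2, if_pos hp] at hw
      cases w with
      | nil => exact List.nil_prefix
      | cons d w' =>
        obtain ⟨mm, new', rfl⟩ : ∃ mm new', new = mm :: new' := by
          cases new with
          | nil => simp at hm
          | cons a b => exact ⟨a, b, rfl⟩
        have hmm : mm = m := by simpa using hm
        rw [List.cons_append] at hw
        have hd : d = mm := (List.cons_prefix_cons.mp hw).1
        subst hd; subst hmm
        exact absurd List.mem_cons_self hmw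
    · rw [pvRep.eq_2, if_neg hp] at hw
      cases w with
      | nil => exact List.nil_prefix
      | cons d w' =>
        obtain ⟨hd, hw'⟩ := List.cons_prefix_cons.mp hw
        subst hd
        exact List.cons_prefix_cons.mpr ⟨rfl, ih w' hw' (fun hmem => hmw (List.mem_cons_of_mem _ hmem))⟩

-- A's six replace passes, composed
def pvChain (l : List Char) : List Char :=
  pvRep pvK6 pvV6 (pvRep pvK5 pvV5 (pvRep pvK4 pvV4 (pvRep pvK3 pvV3' (pvRep pvK2 pvV2' (pvRep pvK1 pvV1' l)))))

lemma pvStep_neg (old new : List Char) (c : Char) (t : List Char)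
    (h : old.isPrefixOf (c :: t) = false) : pvRep old new (c :: t) = c :: pvRep old new t := by
  rw [pvRep.eq_2, if_neg (by simp [h])]

lemma pvScan_neg (c : Char) (t : List Char)
    (h1 : pvK1.isPrefixOf (c :: t) = false) (h2 : pvK2.isPrefixOf (c :: t) = false)
    (h3 : pvK3.isPrefixOf (c :: t) = false) (h4 : pvK4.isPrefixOf (c :: t) = false)
    (h5 : pvK5.isPrefixOf (c :: t) = false) (h6 : pvK6.isPrefixOf (c :: t) = false) :
    pvScan (c :: t) = c :: pvScan t := by
  rw [pvScan.eq_2]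
  simp [h1, h2, h3, h4, h5, h6]

lemma pvChainStep1 (t : List Char) : pvChain (pvK1 ++ t) = pvB1 ++ pvChain ('=' :: t) := by
  simp [pvChain, pvK1, pvK2, pvK3, pvK4, pvK5, pvK6, pvV1', pvV2', pvV3', pvV4, pvV5, pvV6,
    pvB1, pvRep.eq_2, List.isPrefixOf]

lemma pvChainStep2 (t : List Char) : pvChain (pvK2 ++ t) = pvB2 ++ pvChain ('=' :: t) := by
  simp [pvChain, pvK1, pvK2, pvK3, pvK4, pvK5, pvK6, pvV1', pvV2', pvV3', pvV4, pvV5, pvV6,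
    pvB2, pvRep.eq_2, List.isPrefixOf]

lemma pvChainStep3 (t : List Char) : pvChain (pvK3 ++ t) = pvB3 ++ pvChain ('=' :: t) := by
  simp [pvChain, pvK1, pvK2, pvK3, pvK4, pvK5, pvK6, pvV1', pvV2', pvV3', pvV4, pvV5, pvV6,
    pvB3, pvRep.eq_2, List.isPrefixOf]

lemma pvChainStep4 (t : List Char) : pvChain (pvK4 ++ t) = pvV4 ++ pvChain t := by
  simp [pvChain, pvK1, pvK2, pvK3, pvK4, pvK5, pvK6, pvV1', pvV2', pvV3', pvV4, pvV5, pvV6,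
    pvRep.eq_2, List.isPrefixOf]

lemma pvChainStep5 (t : List Char) : pvChain (pvK5 ++ t) = pvV5 ++ pvChain t := by
  simp [pvChain, pvK1, pvK2, pvK3, pvK4, pvK5, pvK6, pvV1', pvV2', pvV3', pvV4, pvV5, pvV6,
    pvRep.eq_2, List.isPrefixOf]

lemma pvChainStep6 (t : List Char) : pvChain (pvK6 ++ t) = pvV6 ++ pvChain t := by
  simp [pvChain, pvK1, pvK2, pvK3, pvK4, pvK5, pvK6, pvV1', pvV2', pvV3', pvV4, pvV5, pvV6,
    pvRep.eq_2, List.isPrefixOf]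

lemma pvScanStep1 (t : List Char) : pvScan (pvK1 ++ t) = pvB1 ++ pvScan ('=' :: t) := by
  rw [show pvK1 ++ t = '[' :: 'e' :: 'd' :: 'i' :: 't' :: '=' :: t from rfl, pvScan.eq_2]
  simp [pvK1, List.isPrefixOf]

lemma pvScanStep2 (t : List Char) : pvScan (pvK2 ++ t) = pvB2 ++ pvScan ('=' :: t) := by
  rw [show pvK2 ++ t = '[' :: 'm' :: 'o' :: 'v' :: 'e' :: '=' :: t from rfl, pvScan.eq_2]
  simp [pvK1, pvK2, List.isPrefixOf]

lemma pvScanStep3 (t : List Char) : pvScan (pvK3 ++ t) = pvB3 ++ pvScan ('=' :: t) := by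
  rw [show pvK3 ++ t = '[' :: 'c' :: 'r' :: 'e' :: 'a' :: 't' :: 'e' :: '=' :: t from rfl, pvScan.eq_2]
  simp [pvK1, pvK2, pvK3, List.isPrefixOf]

lemma pvScanStep4 (t : List Char) : pvScan (pvK4 ++ t) = pvV4 ++ pvScan t := by
  rw [show pvK4 ++ t = '=' :: 'a' :: 'u' :: 't' :: 'o' :: 'c' :: 'o' :: 'n' :: 'f' :: 'i' :: 'r' :: 'm' :: 'e' :: 'd' :: ']' :: t from rfl, pvScan.eq_2]
  simp [pvK1, pvK2, pvK3, pvK4, List.isPrefixOf]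

lemma pvScanStep5 (t : List Char) : pvScan (pvK5 ++ t) = pvV5 ++ pvScan t := by
  rw [show pvK5 ++ t = '=' :: 's' :: 'y' :: 's' :: 'o' :: 'p' :: ']' :: t from rfl, pvScan.eq_2]
  simp [pvK1, pvK2, pvK3, pvK4, pvK5, List.isPrefixOf]

lemma pvScanStep6 (t : List Char) : pvScan (pvK6 ++ t) = pvV6 ++ pvScan t := by
  rw [show pvK6 ++ t = '=' :: 't' :: 'e' :: 'm' :: 'p' :: 'l' :: 'a' :: 't' :: 'e' :: 'e' :: 'd' :: 'i' :: 't' :: 'o' :: 'r' :: ']' :: t from rfl, pvScan.eq_2]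
  simp [pvK1, pvK2, pvK3, pvK4, pvK5, pvK6, List.isPrefixOf]

lemma pvChain_eq_pvScan : ∀ (n : Nat) (l : List Char), l.length ≤ n → pvChain l = pvScan l := by
  intro n
  induction n with
  | zero =>
    intro l h
    have hl : l = [] := by cases l with
      | nil => rfl
      | cons a b => simp at h
    subst hl
    simp [pvChain, pvRep.eq_1, pvScan.eq_1]
  | succ n ih =>
    intro l hl
    by_cases h1 : pvK1.isPrefixOf l = true
    · obtain ⟨t, rfl⟩ := List.isPrefixOf_iff_prefix.mp h1
      rw [pvChainStep1, pvScanStep1, ih ('=' :: t) (by simp [pvK1] at hl ⊢; omega)]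
    · by_cases h2 : pvK2.isPrefixOf l = true
      · obtain ⟨t, rfl⟩ := List.isPrefixOf_iff_prefix.mp h2
        rw [pvChainStep2, pvScanStep2, ih ('=' :: t) (by simp [pvK2] at hl ⊢; omega)]
      · by_cases h3 : pvK3.isPrefixOf l = true
        · obtain ⟨t, rfl⟩ := List.isPrefixOf_iff_prefix.mp h3
          rw [pvChainStep3, pvScanStep3, ih ('=' :: t) (by simp [pvK3] at hl ⊢; omega)]
        · by_cases h4 : pvK4.isPrefixOf l = true
          · obtain ⟨t, rfl⟩ := List.isPrefixOf_iff_prefix.mp h4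
            rw [pvChainStep4, pvScanStep4, ih t (by simp [pvK4] at hl ⊢; omega)]
          · by_cases h5 : pvK5.isPrefixOf l = true
            · obtain ⟨t, rfl⟩ := List.isPrefixOf_iff_prefix.mp h5
              rw [pvChainStep5, pvScanStep5, ih t (by simp [pvK5] at hl ⊢; omega)]
            · by_cases h6 : pvK6.isPrefixOf l = true
              · obtain ⟨t, rfl⟩ := List.isPrefixOf_iff_prefix.mp h6
                rw [pvChainStep6, pvScanStep6, ih t (by simp [pvK6] at hl ⊢; omega)]
              · cases l with
                | nil => simp [pvChain, pvRep.eq_1, pvScan.eq_1]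
                | cons c t =>
                  rw [Bool.not_eq_true] at h1 h2 h3 h4 h5 h6
                  -- lift the six non-match facts over the partial chains
                  have n2 : pvK2.isPrefixOf (c :: pvRep pvK1 pvV1' t) = false := by
                    cases hb : pvK2.isPrefixOf (c :: pvRep pvK1 pvV1' t) with
                    | false => rfl
                    | true =>
                      exfalso
                      have hp := List.isPrefixOf_iff_prefix.mp hb
                      simp only [pvK2] at hp
                      obtain ⟨hc, hw⟩ := List.cons_prefix_cons.mp hp
                      have w1 := pvRep_pull pvK1 pvV1' '[' rfl _ _ hw (by decide)
                      have : pvK2.isPrefixOf (c :: t) = true := by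
                        apply List.isPrefixOf_iff_prefix.mpr
                        simp only [pvK2]
                        exact List.cons_prefix_cons.mpr ⟨hc, w1⟩
                      rw [h2] at this; exact absurd this (by decide)
                  have n3 : pvK3.isPrefixOf (c :: pvRep pvK2 pvV2' (pvRep pvK1 pvV1' t)) = false := by
                    cases hb : pvK3.isPrefixOf (c :: pvRep pvK2 pvV2' (pvRep pvK1 pvV1' t)) with
                    | false => rfl
                    | true =>
                      exfalso
                      have hp := List.isPrefixOf_iff_prefix.mp hb
                      simp only [pvK3] at hp
                      obtain ⟨hc, hw⟩ := List.cons_prefix_cons.mp hp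
                      have w2 := pvRep_pull pvK2 pvV2' '[' rfl _ _ hw (by decide)
                      have w1 := pvRep_pull pvK1 pvV1' '[' rfl _ _ w2 (by decide)
                      have : pvK3.isPrefixOf (c :: t) = true := by
                        apply List.isPrefixOf_iff_prefix.mpr
                        simp only [pvK3]
                        exact List.cons_prefix_cons.mpr ⟨hc, w1⟩
                      rw [h3] at this; exact absurd this (by decide)
                  have n4 : pvK4.isPrefixOf (c :: pvRep pvK3 pvV3' (pvRep pvK2 pvV2' (pvRep pvK1 pvV1' t))) = false := by
                    cases hb : pvK4.isPrefixOf (c :: pvRep pvK3 pvV3' (pvRep pvK2 pvV2' (pvRep pvK1 pvV1' t))) with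
                    | false => rfl
                    | true =>
                      exfalso
                      have hp := List.isPrefixOf_iff_prefix.mp hb
                      simp only [pvK4] at hp
                      obtain ⟨hc, hw⟩ := List.cons_prefix_cons.mp hp
                      have w3 := pvRep_pull pvK3 pvV3' '[' rfl _ _ hw (by decide)
                      have w2 := pvRep_pull pvK2 pvV2' '[' rfl _ _ w3 (by decide)
                      have w1 := pvRep_pull pvK1 pvV1' '[' rfl _ _ w2 (by decide)
                      have : pvK4.isPrefixOf (c :: t) = true := by
                        apply List.isPrefixOf_iff_prefix.mpr
                        simp only [pvK4]
                        exact List.cons_prefix_cons.mpr ⟨hc, w1⟩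
                      rw [h4] at this; exact absurd this (by decide)
                  have n5 : pvK5.isPrefixOf (c :: pvRep pvK4 pvV4 (pvRep pvK3 pvV3' (pvRep pvK2 pvV2' (pvRep pvK1 pvV1' t)))) = false := by
                    cases hb : pvK5.isPrefixOf (c :: pvRep pvK4 pvV4 (pvRep pvK3 pvV3' (pvRep pvK2 pvV2' (pvRep pvK1 pvV1' t)))) with
                    | false => rfl
                    | true =>
                      exfalso
                      have hp := List.isPrefixOf_iff_prefix.mp hb
                      simp only [pvK5] at hp
                      obtain ⟨hc, hw⟩ := List.cons_prefix_cons.mp hp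
                      have w4 := pvRep_pull pvK4 pvV4 '=' rfl _ _ hw (by decide)
                      have w3 := pvRep_pull pvK3 pvV3' '[' rfl _ _ w4 (by decide)
                      have w2 := pvRep_pull pvK2 pvV2' '[' rfl _ _ w3 (by decide)
                      have w1 := pvRep_pull pvK1 pvV1' '[' rfl _ _ w2 (by decide)
                      have : pvK5.isPrefixOf (c :: t) = true := by
                        apply List.isPrefixOf_iff_prefix.mpr
                        simp only [pvK5]
                        exact List.cons_prefix_cons.mpr ⟨hc, w1⟩
                      rw [h5] at this; exact absurd this (by decide)
                  have n6 : pvK6.isPrefixOf (c :: pvRep pvK5 pvV5 (pvRep pvK4 pvV4 (pvRep pvK3 pvV3' (pvRep pvK2 pvV2' (pvRep pvK1 pvV1' t))))) = false := by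
                    cases hb : pvK6.isPrefixOf (c :: pvRep pvK5 pvV5 (pvRep pvK4 pvV4 (pvRep pvK3 pvV3' (pvRep pvK2 pvV2' (pvRep pvK1 pvV1' t))))) with
                    | false => rfl
                    | true =>
                      exfalso
                      have hp := List.isPrefixOf_iff_prefix.mp hb
                      simp only [pvK6] at hp
                      obtain ⟨hc, hw⟩ := List.cons_prefix_cons.mp hp
                      have w5 := pvRep_pull pvK5 pvV5 '=' rfl _ _ hw (by decide)
                      have w4 := pvRep_pull pvK4 pvV4 '=' rfl _ _ w5 (by decide)
                      have w3 := pvRep_pull pvK3 pvV3' '[' rfl _ _ w4 (by decide)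
                      have w2 := pvRep_pull pvK2 pvV2' '[' rfl _ _ w3 (by decide)
                      have w1 := pvRep_pull pvK1 pvV1' '[' rfl _ _ w2 (by decide)
                      have : pvK6.isPrefixOf (c :: t) = true := by
                        apply List.isPrefixOf_iff_prefix.mpr
                        simp only [pvK6]
                        exact List.cons_prefix_cons.mpr ⟨hc, w1⟩
                      rw [h6] at this; exact absurd this (by decide)
                  rw [show pvChain (c :: t) =
                      pvRep pvK6 pvV6 (pvRep pvK5 pvV5 (pvRep pvK4 pvV4 (pvRep pvK3 pvV3'
                        (pvRep pvK2 pvV2' (pvRep pvK1 pvV1' (c :: t)))))) from rfl]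
                  rw [pvStep_neg _ _ _ _ h1, pvStep_neg _ _ _ _ n2, pvStep_neg _ _ _ _ n3,
                      pvStep_neg _ _ _ _ n4, pvStep_neg _ _ _ _ n5, pvStep_neg _ _ _ _ n6]
                  rw [pvScan_neg c t h1 h2 h3 h4 h5 h6]
                  have ht : pvChain t = pvScan t := ih t (by simp at hl; omega)
                  rw [show pvRep pvK6 pvV6 (pvRep pvK5 pvV5 (pvRep pvK4 pvV4 (pvRep pvK3 pvV3'
                        (pvRep pvK2 pvV2' (pvRep pvK1 pvV1' t))))) = pvChain t from rfl, ht]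

lemma pvA_unfold (d : String) : protect_description d =
    PySem.Str.replace (PySem.Str.replace (PySem.Str.replace (PySem.Str.replace (PySem.Str.replace
      (PySem.Str.replace d "[edit=" "[編輯=") "[move=" "[移動=") "[create=" "[建立=")
      "=autoconfirmed]" "=僅允許已自動確認的使用者]") "=sysop]" "=僅限管理員]")
      "=templateeditor]" "=僅允許模板編輯員和管理員]" := rfl

lemma pvA_toList (d : String) : (protect_description d).toList = pvChain d.toList := by
  rw [pvA_unfold]
  simp only [PySem.Str.toList_replace]
  rw [show ("[edit=" : String).toList = pvK1 from rfl, show ("[編輯=" : String).toList = pvV1' from rfl,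
      show ("[move=" : String).toList = pvK2 from rfl, show ("[移動=" : String).toList = pvV2' from rfl,
      show ("[create=" : String).toList = pvK3 from rfl, show ("[建立=" : String).toList = pvV3' from rfl,
      show ("=autoconfirmed]" : String).toList = pvK4 from rfl, show ("=僅允許已自動確認的使用者]" : String).toList = pvV4 from rfl,
      show ("=sysop]" : String).toList = pvK5 from rfl, show ("=僅限管理員]" : String).toList = pvV5 from rfl,
      show ("=templateeditor]" : String).toList = pvK6 from rfl, show ("=僅允許模板編輯員和管理員]" : String).toList = pvV6 from rfl]
  rw [pvReplace_eq pvK1 pvV1' (by decide), pvReplace_eq pvK2 pvV2' (by decide),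
      pvReplace_eq pvK3 pvV3' (by decide), pvReplace_eq pvK4 pvV4 (by decide),
      pvReplace_eq pvK5 pvV5 (by decide), pvReplace_eq pvK6 pvV6 (by decide)]
  rfl

-- ===== VERDICT (by name: the statement is the Claim_ definition above) =====
theorem protect_description_spec : Claim_equal_protect_description := by
  unfold Claim_equal_protect_description Spec_protect_description
  intro d _
  have hA : (protect_description d).toList = pvChain d.toList := pvA_toList d
  have hC : pvChain d.toList = pvScan d.toList := pvChain_eq_pvScan d.toList.length d.toList le_rfl
  have hB : (protect_description_alt d).toList = pvScan d.toList := by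
    simp [protect_description_alt]
  apply String.toList_inj.mp
  rw [hA, hC, hB]
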